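-- pv_equiv track=rewrite | github.com/kimmokalover/Linear-Algebra | toeplitz_matrix.py | toeplitz
-- ===== SOURCE A (Python) =====
-- def toeplitz(a, b):
--     n1 = len(a)
--     n2 = len(b)
--     A = []
--     for i in range(n1):
--         A.append([])
--         for j in range(n2):
--             if i > j :
--                 A[i].append(a[i - j])
--             else :
--                 A[i].append(b[j - i])
--     return A
-- ===== SOURCE B (Python) =====
-- def toeplitz(a, b):
--     # Row recurrence: row 0 is b; each later row i is a[i] prepended to the
--     # previous row with the last element shifted out (Toeplitz shift structure).
--     n2 = len(b)
--     rows = []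
--     row = list(b)
--     for i in range(len(a)):
--         if i > 0:
--             row = ([a[i]] + row)[:n2]
--         rows.append(row)
--     return rows
-- ===== Notes on version B (the rewrite author's own statement) =====
-- stated objective: alternative
-- what changed: B builds the matrix by a row recurrence exploiting the Toeplitz shift structure: row 0 is b, and each later row i is a[i] prepended to the previous row truncated to length n2, instead of A's per-cell indexing with an if i>j branch into a or b.
import Mathlib
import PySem

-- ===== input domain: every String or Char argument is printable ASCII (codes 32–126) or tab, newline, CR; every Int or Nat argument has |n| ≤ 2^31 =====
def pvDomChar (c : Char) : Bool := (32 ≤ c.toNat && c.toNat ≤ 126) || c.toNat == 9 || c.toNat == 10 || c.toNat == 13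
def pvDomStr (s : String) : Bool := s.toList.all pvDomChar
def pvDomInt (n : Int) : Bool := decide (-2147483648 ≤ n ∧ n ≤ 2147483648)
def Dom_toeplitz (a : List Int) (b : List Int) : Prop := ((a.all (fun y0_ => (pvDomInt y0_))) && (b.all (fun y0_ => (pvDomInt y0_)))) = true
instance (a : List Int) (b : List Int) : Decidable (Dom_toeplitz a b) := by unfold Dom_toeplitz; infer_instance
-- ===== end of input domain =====

-- B builds the matrix by a row recurrence (row 0 = b; row i = a[i] prepended to the previous
-- row truncated to length n2), instead of A's per-cell if i>j indexing; objective: alternative.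
-- All indices both programs use are provably in range, so pyGetD with default 0 is exact here.

-- ===== PORT A =====
def toeplitz (a : List Int) (b : List Int) : List (List Int) :=
  let n1 : Int := a.length
  let n2 : Int := b.length
  (PySem.List.pyRange 0 n1 1).map (fun i =>
    (PySem.List.pyRange 0 n2 1).map (fun j =>
      if i > j then PySem.List.pyGetD a (i - j) 0 else PySem.List.pyGetD b (j - i) 0))

-- ===== PORT B =====
def toeplitz_alt (a : List Int) (b : List Int) : List (List Int) :=
  let n2 : Int := b.length
  let st := (PySem.List.pyRange 0 a.length 1).foldl
    (fun (st : List (List Int) × List Int) i =>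
      let row := if i > 0 then
          PySem.List.slice (PySem.List.pyGetD a i 0 :: st.2) none (some n2)
        else st.2
      (st.1 ++ [row], row))
    ([], b)
  st.1

-- ===== PRECONDITION & SPEC =====
def Spec_toeplitz (a : List Int) (b : List Int) (out : List (List Int)) : Prop := out = toeplitz_alt a b
instance (a : List Int) (b : List Int) (out : List (List Int)) : Decidable (Spec_toeplitz a b out) := by unfold Spec_toeplitz; infer_instance

-- ===== CLAIM (what is proved, stated in full; the proofs are below) =====
def Claim_equal_toeplitz : Prop := ∀ (a : List Int) (b : List Int), Dom_toeplitz a b → Spec_toeplitz a b (toeplitz a b)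

-- ===== LEMMAS AND PROOFS =====

-- A's row i, as produced by port A
def rowA (a b : List Int) (i : Int) : List Int :=
  (PySem.List.pyRange 0 (b.length : Int) 1).map (fun j =>
    if i > j then PySem.List.pyGetD a (i - j) 0 else PySem.List.pyGetD b (j - i) 0)

theorem length_rowA (a b : List Int) (i : Int) : (rowA a b i).length = b.length := by
  simp [rowA, PySem.List.length_pyRange_one]

theorem rowA_zero (a b : List Int) : rowA a b 0 = b := by
  unfold rowA
  rw [List.map_congr_left (g := fun j => PySem.List.pyGetD b j 0) ?_]
  · exact PySem.List.map_pyGetD_pyRange_zero' b 0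
  · intro j hj
    rw [PySem.List.mem_pyRange_one] at hj
    rw [if_neg (by omega), sub_zero]

-- Toeplitz shift: the next row is a[i+1] consed on, truncated to length n2
theorem rowA_succ (a b : List Int) (i : Int) (h0 : 0 ≤ i) :
    rowA a b (i + 1) =
      PySem.List.slice (PySem.List.pyGetD a (i + 1) 0 :: rowA a b i) none (some (b.length : Int)) := by
  rw [PySem.List.slice_to_natCast]
  apply List.ext_getElem
  · simp [rowA, PySem.List.length_pyRange_one]
  · intro k hk hk'
    have hkb : k < b.length := by
      simpa [length_rowA, rowA, PySem.List.length_pyRange_one] using hk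
    rw [List.getElem_take]
    unfold rowA
    rw [List.getElem_map, PySem.List.getElem_pyRange_one]
    cases k with
    | zero =>
      simp only [List.getElem_cons_zero]
      rw [if_pos (by push_cast; omega)]
      norm_num
    | succ m =>
      rw [List.getElem_cons_succ, List.getElem_map, PySem.List.getElem_pyRange_one]
      push_cast
      split_ifs with h1 h2 h2
      · congr 1; omega
      · omega
      · omega
      · congr 1; omega

-- fold invariant: from state (acc, rowA (m-1)) with m ≥ 1, B's loop appends rowA m, rowA (m+1), …
theorem fold_inv (a b : List Int) (n1 : Int) (k : Nat) :
    ∀ (m : Int) (acc : List (List Int)), 1 ≤ m → n1 = m + k →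
    (PySem.List.pyRange m n1 1).foldl
      (fun (st : List (List Int) × List Int) i =>
        let row := if i > 0 then
            PySem.List.slice (PySem.List.pyGetD a i 0 :: st.2) none (some (b.length : Int))
          else st.2
        (st.1 ++ [row], row))
      (acc, rowA a b (m - 1))
    = (acc ++ (PySem.List.pyRange m n1 1).map (rowA a b), rowA a b (n1 - 1)) := by
  induction k with
  | zero =>
    intro m acc hm hn
    rw [PySem.List.pyRange_one_eq_nil (by omega)]
    simp only [List.foldl_nil, List.map_nil, List.append_nil]
    congr 2
    omega
  | succ k ih =>
    intro m acc hm hn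
    rw [PySem.List.pyRange_one_cons (by omega)]
    simp only [List.foldl_cons, List.map_cons]
    rw [if_pos (by omega)]
    have hrow : PySem.List.slice (PySem.List.pyGetD a m 0 :: rowA a b (m - 1)) none
        (some (b.length : Int)) = rowA a b m := by
      have := (rowA_succ a b (m - 1) (by omega)).symm
      simpa [show m - 1 + 1 = m by ring] using this
    rw [hrow]
    have := ih (m + 1) (acc ++ [rowA a b m]) (by omega) (by push_cast at hn ⊢; omega)
    rw [show m + 1 - 1 = m by ring] at this
    rw [this, List.append_assoc]
    rfl

theorem toeplitz_spec : Claim_equal_toeplitz := by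
  intro a b _
  unfold Spec_toeplitz toeplitz toeplitz_alt
  simp only []
  by_cases h : a.length = 0
  · rw [show ((a.length : Int)) = 0 by omega, PySem.List.pyRange_one_eq_nil le_rfl]
    rfl
  · rw [PySem.List.pyRange_one_cons (by omega : (0:Int) < (a.length : Int))]
    simp only [List.foldl_cons, List.map_cons]
    rw [if_neg (by omega), show (0:Int) + 1 = 1 by norm_num]
    have key := fold_inv a b (a.length : Int) (a.length - 1) 1 ([] ++ [b]) le_rfl
      (by omega)
    rw [show rowA a b (1 - 1) = b by norm_num [rowA_zero]] at key
    rw [key]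
    show rowA a b 0 :: (PySem.List.pyRange 1 (a.length : Int) 1).map (rowA a b)
      = ([] ++ [b]) ++ (PySem.List.pyRange 1 (a.length : Int) 1).map (rowA a b)
    rw [rowA_zero]
    rfl
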